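-- pv_equiv track=rewrite | github.com/automl/learna | src/learna/environment.py | _encode_gap
-- ===== SOURCE A (Python) =====
-- def _get_index_diff(string):
--     """
--     Compute the index of a corresponding closing bracket to an opening bracket.
--
--     Args:
--         string: The string to compute the index of corresponding closing bracket for.
--
--     Returns:
--         The index of the corresponding closing bracket for the first opening bracket
--     """
--     bracket_count = 0
--     for index, base in enumerate(string):
--         if base == "(":
--             bracket_count += 1
--         elif base == ")":
--             bracket_count -= 1
--         else:
--             continue
--         if bracket_count == 0:
--             return index
--
-- def _encode_gap(secondary):
--     """
--     Encode the target structure using gap encoding.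
--
--     Args:
--         secondary: The secondary structure that needs to get gap encoded.
--
--     Returns:
--         Gap encoding of the target secondary structure.
--
--     Note:
--         There exists a O(n) implementation of this algorithm using a stack.
--     """
--     gap_encoding = [0 for x in secondary]
--     for index, base in enumerate(secondary):
--         if base != "(":
--             continue
--         else:
--             index_diff = _get_index_diff(secondary[index:])
--             gap_encoding[index] = index_diff
--             gap_encoding[index + index_diff] = index_diff * -1
--     return gap_encoding
-- ===== SOURCE B (Python) =====
-- def _encode_gap(secondary):
--     gap_encoding = [0] * len(secondary)
--     stack = []
--     for index, base in enumerate(secondary):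
--         if base == "(":
--             stack.append(index)
--         elif base == ")":
--             if stack:
--                 opening = stack.pop()
--                 gap_encoding[opening] = index - opening
--                 gap_encoding[index] = opening - index
--     return gap_encoding
-- ===== Notes on version B (the rewrite author's own statement) =====
-- stated objective: alternative
-- what changed: Replaced the per-open-bracket rescan of the remaining string (_get_index_diff) by a single left-to-right pass that keeps a stack of open-bracket indices and writes both gap entries when the matching closing bracket is reached.
-- outside the precondition, e.g. on _encode_gap('('): A raises TypeError, B returns [0]
import Mathlib
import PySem

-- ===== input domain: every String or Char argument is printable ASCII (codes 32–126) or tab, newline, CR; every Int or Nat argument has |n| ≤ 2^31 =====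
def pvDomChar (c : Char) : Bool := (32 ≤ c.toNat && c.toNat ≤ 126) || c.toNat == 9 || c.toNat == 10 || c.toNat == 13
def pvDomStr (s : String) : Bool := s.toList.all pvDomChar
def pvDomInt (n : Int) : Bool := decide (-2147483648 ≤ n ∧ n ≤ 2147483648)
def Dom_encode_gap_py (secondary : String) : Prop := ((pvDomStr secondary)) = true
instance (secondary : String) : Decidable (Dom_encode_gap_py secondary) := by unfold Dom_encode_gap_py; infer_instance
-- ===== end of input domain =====

-- B replaces A's per-'(' rescan of the rest of the string by one pass with a stack of
-- open-bracket indices (objective: alternative single-pass algorithm).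

-- ===== PORT A =====
-- _get_index_diff(string): scan with a bracket counter, return the index where it first hits 0
-- (after updating on a bracket character); falling off the end is Python's implicit None.
def gidAux : List Char → Nat → Int → Option Nat
  | [], _, _ => none
  | c :: rest, idx, cnt =>
    if c = '(' then
      if cnt + 1 = 0 then some idx else gidAux rest (idx + 1) (cnt + 1)
    else if c = ')' then
      if cnt - 1 = 0 then some idx else gidAux rest (idx + 1) (cnt - 1)
    else gidAux rest (idx + 1) cnt

-- the 'for index, base in enumerate(secondary)' loop of _encode_gap, index carried explicitly;
-- secondary[index:] is cs.drop idx (slice with a nonnegative in-range start = drop).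
-- On `none` Python stores None and then raises TypeError at `index + index_diff`:
-- that input is excluded by Pre_encode_gap_py (the loop state is kept unchanged here).
def encodeLoopA (cs : List Char) : List Char → Nat → List Int → List Int
  | [], _, gap => gap
  | c :: r, idx, gap =>
    if c ≠ '(' then encodeLoopA cs r (idx + 1) gap
    else
      match gidAux (cs.drop idx) 0 0 with
      | some d => encodeLoopA cs r (idx + 1) ((gap.set idx (d : Int)).set (idx + d) (-(d : Int)))
      | none => encodeLoopA cs r (idx + 1) gap

def encode_gap_py (secondary : String) : List Int :=
  let cs := secondary.toList
  encodeLoopA cs cs 0 (cs.map (fun _ => (0 : Int)))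

-- ===== PORT B =====
-- Source B's single pass: stack of indices of still-open '('; a ')' with a nonempty stack pops
-- the matching open and writes both gap entries.
def encodeLoopB : List Char → Nat → List Int → List Nat → List Int
  | [], _, gap, _ => gap
  | c :: r, idx, gap, stack =>
    if c = '(' then encodeLoopB r (idx + 1) gap (idx :: stack)
    else if c = ')' then
      match stack with
      | [] => encodeLoopB r (idx + 1) gap []
      | j :: rest =>
          encodeLoopB r (idx + 1)
            ((gap.set j ((idx : Int) - (j : Int))).set idx ((j : Int) - (idx : Int))) rest
    else encodeLoopB r (idx + 1) gap stack

def encode_gap_py_alt (secondary : String) : List Int :=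
  let cs := secondary.toList
  encodeLoopB cs 0 (List.replicate cs.length (0 : Int)) []

-- ===== PRECONDITION & SPEC =====
-- number of unmatched '(' (Nat subtraction clamps at 0 exactly like an empty stack)
def openCount (cs : List Char) : Nat :=
  cs.foldl (fun n c => if c = '(' then n + 1 else if c = ')' then n - 1 else n) 0

-- Pre_ excludes exactly the strings with an unmatched '(' : there Python A raises TypeError
-- (_get_index_diff returns None and A computes index + None).
def Pre_encode_gap_py (secondary : String) : Prop := openCount secondary.toList = 0
instance (secondary : String) : Decidable (Pre_encode_gap_py secondary) := by
  unfold Pre_encode_gap_py; infer_instance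

def pvWitness_encode_gap_py : String := "((.)().)"

def Spec_encode_gap_py (secondary : String) (out : List Int) : Prop := out = encode_gap_py_alt secondary
instance (secondary : String) (out : List Int) : Decidable (Spec_encode_gap_py secondary out) := by unfold Spec_encode_gap_py; infer_instance

-- ===== CLAIM (what is proved, stated in full; the proofs are below) =====
def Claim_equal_encode_gap_py : Prop := ∀ (secondary : String), Dom_encode_gap_py secondary → Pre_encode_gap_py secondary → Spec_encode_gap_py secondary (encode_gap_py secondary)

-- ===== LEMMAS AND PROOFS =====

-- proof-side definitions ------------------------------------------------------

-- the write both programs perform for a matched pair (open, close)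
def applyPairs (ps : List (Nat × Nat)) (gap : List Int) : List Int :=
  ps.foldl (fun g p => (g.set p.1 ((p.2 : Int) - (p.1 : Int))).set p.2 ((p.1 : Int) - (p.2 : Int))) gap

-- the matched pairs B will still produce from suffix r at absolute index i with stack st,
-- in order of closing position
def scanP : List Char → Nat → List Nat → List (Nat × Nat)
  | [], _, _ => []
  | c :: r, i, st =>
    if c = '(' then scanP r (i + 1) (i :: st)
    else if c = ')' then
      match st with
      | [] => scanP r (i + 1) []
      | j :: st' => (j, i) :: scanP r (i + 1) st'
    else scanP r (i + 1) st

-- the final stack of the same scan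
def scanStk : List Char → Nat → List Nat → List Nat
  | [], _, st => st
  | c :: r, i, st =>
    if c = '(' then scanStk r (i + 1) (i :: st)
    else if c = ')' then
      match st with
      | [] => scanStk r (i + 1) []
      | _ :: st' => scanStk r (i + 1) st'
    else scanStk r (i + 1) st

-- the matched pairs A will still produce from suffix r at absolute index idx, in order of opening position
def APairs (cs : List Char) : List Char → Nat → List (Nat × Nat)
  | [], _ => []
  | c :: r, idx =>
    if c ≠ '(' then APairs cs r (idx + 1)
    else
      match gidAux (cs.drop idx) 0 0 with
      | some d => (idx, idx + d) :: APairs cs r (idx + 1)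
      | none => APairs cs r (idx + 1)

lemma B_eq_applyPairs (r : List Char) : ∀ (i : Nat) (gap : List Int) (st : List Nat),
    encodeLoopB r i gap st = applyPairs (scanP r i st) gap := by
  induction r with
  | nil => intro i gap st; simp [encodeLoopB, scanP, applyPairs]
  | cons c r ih =>
    intro i gap st
    by_cases h1 : c = '('
    · simp [encodeLoopB, scanP, h1, ih]
    · by_cases h2 : c = ')'
      · cases st with
        | nil => simp [encodeLoopB, scanP, h2, ih]
        | cons j st' => simp [encodeLoopB, scanP, applyPairs, h2, ih]
      · simp [encodeLoopB, scanP, h1, h2, ih]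

lemma A_eq_applyPairs (cs : List Char) (r : List Char) : ∀ (idx : Nat) (gap : List Int),
    encodeLoopA cs r idx gap = applyPairs (APairs cs r idx) gap := by
  induction r with
  | nil => intro idx gap; simp [encodeLoopA, APairs, applyPairs]
  | cons c r ih =>
    intro idx gap
    by_cases h1 : c = '('
    · rcases hg : gidAux (cs.drop idx) 0 0 with _ | d
      · simp [encodeLoopA, APairs, h1, hg, ih]
      · simp [encodeLoopA, APairs, h1, hg, applyPairs, ih]
    · simp [encodeLoopA, APairs, h1, ih]

-- gidAux tracks the stack: every pair B emits is exactly what A's rescan finds,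
-- and stacked-forever opens make A's rescan return none
lemma gid_track (cs : List Char) (r : List Char) : ∀ (i : Nat) (st : List Nat),
    cs.drop i = r → (∀ j ∈ st, j < i) →
    (∀ (t : Nat) (h : t < st.length), gidAux (cs.drop st[t]) 0 0 = gidAux r (i - st[t]) ((t : Int) + 1)) →
    (∀ p ∈ scanP r i st, gidAux (cs.drop p.1) 0 0 = some (p.2 - p.1)) ∧
    (∀ j ∈ scanStk r i st, gidAux (cs.drop j) 0 0 = none) := by
  induction r with
  | nil =>
    intro i st _ _ hst
    constructor
    · intro p hp; simp [scanP] at hp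
    · intro j hj
      simp only [scanStk] at hj
      obtain ⟨t, ht, rfl⟩ := List.mem_iff_getElem.mp hj
      rw [hst t ht]; simp [gidAux]
  | cons c r ih =>
    intro i st hdrop hlt hst
    have hdrop' : cs.drop (i + 1) = r := by
      rw [← List.tail_drop, hdrop]; rfl
    by_cases h1 : c = '('
    · subst h1
      have hnew : ∀ (t : Nat) (h : t < (i :: st).length),
          gidAux (cs.drop (i :: st)[t]) 0 0 = gidAux r ((i + 1) - (i :: st)[t]) ((t : Int) + 1) := by
        intro t ht
        match t with
        | 0 =>
          simp only [List.getElem_cons_zero, Nat.cast_zero]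
          rw [hdrop]
          simp [gidAux]
        | Nat.succ t =>
          simp only [List.getElem_cons_succ]
          have htl : t < st.length := by simpa using ht
          have hjlt : st[t] < i := hlt _ (List.getElem_mem htl)
          rw [hst t htl]
          have hne : ¬ ((t : Int) + 1 + 1 = 0) := by omega
          simp only [gidAux, if_neg hne]
          have h3 : i - st[t] + 1 = i + 1 - st[t] := by omega
          rw [h3]
          congr 1
      have hlt' : ∀ j ∈ i :: st, j < i + 1 := by
        intro j hj
        rcases List.mem_cons.mp hj with rfl | hj
        · omega
        · exact Nat.lt_succ_of_lt (hlt _ hj)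
      have := ih (i + 1) (i :: st) hdrop' hlt' hnew
      simpa [scanP, scanStk] using this
    · by_cases h2 : c = ')'
      · subst h2
        cases st with
        | nil =>
          have := ih (i + 1) [] hdrop' (by simp) (by intro t ht; simp at ht)
          simpa [scanP, scanStk, h1] using this
        | cons j st' =>
          have hjlt : j < i := hlt _ List.mem_cons_self
          have htop : gidAux (cs.drop j) 0 0 = some (i - j) := by
            have h0 := hst 0 (by simp)
            simp only [List.getElem_cons_zero, Nat.cast_zero] at h0
            rw [h0]
            simp [gidAux, h1]
          have hnew : ∀ (t : Nat) (h : t < st'.length),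
              gidAux (cs.drop st'[t]) 0 0 = gidAux r ((i + 1) - st'[t]) ((t : Int) + 1) := by
            intro t ht
            have hts : t + 1 < (j :: st').length := by simpa using Nat.succ_lt_succ ht
            have h0 := hst (t + 1) hts
            simp only [List.getElem_cons_succ] at h0
            have hjlt' : st'[t] < i := hlt _ (List.mem_cons_of_mem _ (List.getElem_mem ht))
            rw [h0]
            have hne : ¬ (((t + 1 : Nat) : Int) + 1 - 1 = 0) := by push_cast; omega
            simp only [gidAux, h1, if_neg hne, if_false, ite_true]
            have h3 : i - st'[t] + 1 = i + 1 - st'[t] := by omega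
            rw [h3]
            congr 1
            omega
          have hlt' : ∀ jj ∈ st', jj < i + 1 :=
            fun jj hjj => Nat.lt_succ_of_lt (hlt _ (List.mem_cons_of_mem _ hjj))
          obtain ⟨ihP, ihS⟩ := ih (i + 1) st' hdrop' hlt' hnew
          constructor
          · intro p hp
            simp only [scanP, if_neg h1, List.mem_cons, ite_true] at hp
            rcases hp with hph | hph
            · subst hph; simpa using htop
            · exact ihP p hph
          · intro jj hjj
            simp only [scanStk, if_neg h1, ite_true] at hjj
            exact ihS jj hjj
      · have hnew : ∀ (t : Nat) (h : t < st.length),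
            gidAux (cs.drop st[t]) 0 0 = gidAux r ((i + 1) - st[t]) ((t : Int) + 1) := by
          intro t ht
          have hjlt : st[t] < i := hlt _ (List.getElem_mem ht)
          rw [hst t ht]
          simp only [gidAux, if_neg h1, if_neg h2]
          have h3 : i - st[t] + 1 = i + 1 - st[t] := by omega
          rw [h3]
        have hlt' : ∀ j ∈ st, j < i + 1 := fun j hj => Nat.lt_succ_of_lt (hlt _ hj)
        have := ih (i + 1) st hdrop' hlt' hnew
        simpa [scanP, scanStk, h1, h2] using this

lemma scanP_props (cs : List Char) (r : List Char) : ∀ (i : Nat) (st : List Nat),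
    cs.drop i = r → (∀ j ∈ st, j < i ∧ cs[j]? = some '(') → st.Nodup →
    (∀ p ∈ scanP r i st, (p.1 ∈ st ∨ i ≤ p.1) ∧ p.1 < p.2 ∧ i ≤ p.2 ∧
        cs[p.1]? = some '(' ∧ cs[p.2]? = some ')') ∧
    ((scanP r i st).map Prod.fst).Nodup ∧
    (scanP r i st).Pairwise (fun p q => p.2 < q.2) := by
  induction r with
  | nil => intro i st _ _ _; simp [scanP]
  | cons c r ih =>
    intro i st hdrop hstp hnd
    have hdrop' : cs.drop (i + 1) = r := by rw [← List.tail_drop, hdrop]; rfl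
    have hci : cs[i]? = some c := by
      have h0 : (cs.drop i)[0]? = cs[i + 0]? := List.getElem?_drop
      rw [hdrop] at h0
      simpa using h0.symm
    by_cases h1 : c = '('
    · subst h1
      have hstp' : ∀ j ∈ i :: st, j < i + 1 ∧ cs[j]? = some '(' := by
        intro j hj
        rcases List.mem_cons.mp hj with rfl | hj
        · exact ⟨Nat.lt_succ_self _, hci⟩
        · exact ⟨Nat.lt_succ_of_lt (hstp j hj).1, (hstp j hj).2⟩
      have hnd' : (i :: st).Nodup := by
        refine List.nodup_cons.mpr ⟨fun hmem => ?_, hnd⟩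
        exact absurd ((hstp i hmem).1) (lt_irrefl i)
      obtain ⟨P, N, W⟩ := ih (i + 1) (i :: st) hdrop' hstp' hnd'
      refine ⟨?_, ?_, ?_⟩ <;> simp only [scanP, ite_true]
      · intro p hp
        obtain ⟨hmem, hlt, hle, hc1, hc2⟩ := P p hp
        refine ⟨?_, hlt, by omega, hc1, hc2⟩
        rcases hmem with h | h
        · rcases List.mem_cons.mp h with h' | h'
          · exact Or.inr (le_of_eq h'.symm)
          · exact Or.inl h'
        · exact Or.inr (by omega)
      · exact N
      · exact W
    · by_cases h2 : c = ')'
      · subst h2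
        cases st with
        | nil =>
          obtain ⟨P, N, W⟩ := ih (i + 1) [] hdrop' (by simp) List.nodup_nil
          refine ⟨?_, ?_, ?_⟩ <;> simp only [scanP, if_neg h1, ite_true]
          · intro p hp
            obtain ⟨hmem, hlt, hle, hc1, hc2⟩ := P p hp
            refine ⟨Or.inr ?_, hlt, by omega, hc1, hc2⟩
            cases hmem with
            | inl h => exact absurd h (List.not_mem_nil)
            | inr h => omega
          · exact N
          · exact W
        | cons j st' =>
          have hj := hstp j List.mem_cons_self
          have hstp' : ∀ jj ∈ st', jj < i + 1 ∧ cs[jj]? = some '(' := by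
            intro jj hjj
            have := hstp jj (List.mem_cons_of_mem _ hjj)
            exact ⟨Nat.lt_succ_of_lt this.1, this.2⟩
          obtain ⟨P, N, W⟩ := ih (i + 1) st' hdrop' hstp' (List.Nodup.of_cons hnd)
          have hjnotst' : j ∉ st' := (List.nodup_cons.mp hnd).1
          have hfst : ∀ p ∈ scanP r (i + 1) st', p.1 ≠ j := by
            intro p hp hpj
            rcases (P p hp).1 with h | h
            · rw [hpj] at h; exact hjnotst' h
            · omega
          refine ⟨?_, ?_, ?_⟩ <;> simp only [scanP, if_neg h1, ite_true]
          · intro p hp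
            rcases List.mem_cons.mp hp with rfl | hp
            · exact ⟨Or.inl List.mem_cons_self, hj.1, le_refl _, hj.2, hci⟩
            · obtain ⟨hmem, hlt, hle, hc1, hc2⟩ := P p hp
              refine ⟨?_, hlt, by omega, hc1, hc2⟩
              rcases hmem with h | h
              · exact Or.inl (List.mem_cons_of_mem _ h)
              · exact Or.inr (by omega)
          · refine List.nodup_cons.mpr ⟨?_, N⟩
            intro hmem
            obtain ⟨p, hp, hpj⟩ := List.mem_map.mp hmem
            exact hfst p hp hpj
          · refine List.pairwise_cons.mpr ⟨?_, W⟩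
            intro p hp
            have := (P p hp).2.2.1
            omega
      · have hstp' : ∀ j ∈ st, j < i + 1 ∧ cs[j]? = some '(' :=
          fun j hj => ⟨Nat.lt_succ_of_lt (hstp j hj).1, (hstp j hj).2⟩
        obtain ⟨P, N, W⟩ := ih (i + 1) st hdrop' hstp' hnd
        refine ⟨?_, ?_, ?_⟩ <;> simp only [scanP, if_neg h1, if_neg h2]
        · intro p hp
          obtain ⟨hmem, hlt, hle, hc1, hc2⟩ := P p hp
          refine ⟨?_, hlt, by omega, hc1, hc2⟩
          cases hmem with
          | inl h => exact Or.inl h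
          | inr h => exact Or.inr (by omega)
        · exact N
        · exact W

lemma scanP_complete (cs : List Char) (r : List Char) : ∀ (i : Nat) (st : List Nat),
    cs.drop i = r →
    ∀ k, (k ∈ st ∨ (i ≤ k ∧ cs[k]? = some '(')) →
      k ∈ (scanP r i st).map Prod.fst ∨ k ∈ scanStk r i st := by
  induction r with
  | nil =>
    intro i st hdrop k hk
    rcases hk with hk | ⟨hik, hck⟩
    · exact Or.inr (by simpa [scanStk] using hk)
    · exfalso
      have hlen : cs.length ≤ i := List.drop_eq_nil_iff.mp hdrop
      have : cs[k]? = none := List.getElem?_eq_none (by omega)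
      rw [this] at hck; simp at hck
  | cons c r ih =>
    intro i st hdrop k hk
    have hdrop' : cs.drop (i + 1) = r := by rw [← List.tail_drop, hdrop]; rfl
    have hci : cs[i]? = some c := by
      have h0 : (cs.drop i)[0]? = cs[i + 0]? := List.getElem?_drop
      rw [hdrop] at h0
      simpa using h0.symm
    by_cases h1 : c = '('
    · subst h1
      have hk' : k ∈ i :: st ∨ (i + 1 ≤ k ∧ cs[k]? = some '(') := by
        rcases hk with hk | ⟨hik, hck⟩
        · exact Or.inl (List.mem_cons_of_mem _ hk)
        · rcases Nat.eq_or_lt_of_le hik with rfl | hlt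
          · exact Or.inl List.mem_cons_self
          · exact Or.inr ⟨hlt, hck⟩
      simpa [scanP, scanStk] using ih (i + 1) (i :: st) hdrop' k hk'
    · by_cases h2 : c = ')'
      · subst h2
        have hknei : ∀ _ : i ≤ k, cs[k]? = some '(' → i + 1 ≤ k := by
          intro hik hck
          rcases Nat.eq_or_lt_of_le hik with rfl | hlt
          · rw [hci] at hck; simp at hck
          · exact hlt
        cases st with
        | nil =>
          have hk' : k ∈ ([] : List Nat) ∨ (i + 1 ≤ k ∧ cs[k]? = some '(') := by
            rcases hk with hk | ⟨hik, hck⟩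
            · exact absurd hk (List.not_mem_nil)
            · exact Or.inr ⟨hknei hik hck, hck⟩
          simpa [scanP, scanStk, h1] using ih (i + 1) [] hdrop' k hk'
        | cons j st' =>
          rcases hk with hk | ⟨hik, hck⟩
          · rcases List.mem_cons.mp hk with rfl | hk'
            · refine Or.inl ?_
              simp [scanP, h1]
            · have := ih (i + 1) st' hdrop' k (Or.inl hk')
              rcases this with h | h
              · refine Or.inl ?_
                simp only [scanP, if_neg h1, ite_true, List.map_cons, List.mem_cons]
                exact Or.inr h
              · exact Or.inr (by simpa [scanStk, h1] using h)
          · have := ih (i + 1) st' hdrop' k (Or.inr ⟨hknei hik hck, hck⟩)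
            rcases this with h | h
            · refine Or.inl ?_
              simp only [scanP, if_neg h1, ite_true, List.map_cons, List.mem_cons]
              exact Or.inr h
            · exact Or.inr (by simpa [scanStk, h1] using h)
      · have hk' : k ∈ st ∨ (i + 1 ≤ k ∧ cs[k]? = some '(') := by
          rcases hk with hk | ⟨hik, hck⟩
          · exact Or.inl hk
          · refine Or.inr ⟨?_, hck⟩
            rcases Nat.eq_or_lt_of_le hik with rfl | hlt
            · rw [hci] at hck
              exact absurd (Option.some_injective _ hck) h1
            · exact hlt
        simpa [scanP, scanStk, h1, h2] using ih (i + 1) st hdrop' k hk'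

lemma mem_APairs (cs : List Char) (r : List Char) : ∀ (idx : Nat), cs.drop idx = r →
    ∀ p : Nat × Nat, (p ∈ APairs cs r idx ↔
      idx ≤ p.1 ∧ cs[p.1]? = some '(' ∧
        ∃ d, gidAux (cs.drop p.1) 0 0 = some d ∧ p.2 = p.1 + d) := by
  induction r with
  | nil =>
    intro idx hdrop p
    simp only [APairs, List.not_mem_nil, false_iff]
    rintro ⟨hle, hc, -⟩
    have hlen : cs.length ≤ idx := List.drop_eq_nil_iff.mp hdrop
    have : cs[p.1]? = none := List.getElem?_eq_none (by omega)
    rw [this] at hc; simp at hc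
  | cons c r ih =>
    intro idx hdrop p
    have hdrop' : cs.drop (idx + 1) = r := by rw [← List.tail_drop, hdrop]; rfl
    have hci : cs[idx]? = some c := by
      have h0 : (cs.drop idx)[0]? = cs[idx + 0]? := List.getElem?_drop
      rw [hdrop] at h0
      simpa using h0.symm
    by_cases h1 : c = '('
    · subst h1
      rcases hg : gidAux (cs.drop idx) 0 0 with _ | d
      · rw [show APairs cs ('(' :: r) idx = APairs cs r (idx + 1) by simp [APairs, hg]]
        rw [ih (idx + 1) hdrop' p]
        constructor
        · rintro ⟨hle, hc, hd⟩; exact ⟨by omega, hc, hd⟩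
        · rintro ⟨hle, hc, d, hd, he⟩
          rcases Nat.eq_or_lt_of_le hle with heq | hlt
          · subst heq; rw [hg] at hd; simp at hd
          · exact ⟨hlt, hc, d, hd, he⟩
      · rw [show APairs cs ('(' :: r) idx = (idx, idx + d) :: APairs cs r (idx + 1) by simp [APairs, hg]]
        rw [List.mem_cons, ih (idx + 1) hdrop' p]
        constructor
        · rintro (rfl | ⟨hle, hc, hd⟩)
          · exact ⟨le_refl _, hci, d, hg, rfl⟩
          · exact ⟨by omega, hc, hd⟩
        · rintro ⟨hle, hc, d', hd', he⟩
          rcases Nat.eq_or_lt_of_le hle with heq | hlt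
          · left
            subst heq
            rw [hg] at hd'
            obtain rfl := Option.some_injective _ hd'
            exact Prod.ext rfl he
          · exact Or.inr ⟨hlt, hc, d', hd', he⟩
    · rw [show APairs cs (c :: r) idx = APairs cs r (idx + 1) by simp [APairs, h1]]
      rw [ih (idx + 1) hdrop' p]
      constructor
      · rintro ⟨hle, hc, hd⟩; exact ⟨by omega, hc, hd⟩
      · rintro ⟨hle, hc, d, hd, he⟩
        rcases Nat.eq_or_lt_of_le hle with heq | hlt
        · rw [← heq, hci] at hc
          exact absurd (Option.some_injective _ hc) h1
        · exact ⟨hlt, hc, d, hd, he⟩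


-- APairs' opening positions are strictly increasing
lemma APairs_fst (cs : List Char) (r : List Char) : ∀ (idx : Nat),
    (∀ p ∈ APairs cs r idx, idx ≤ p.1) ∧
    (APairs cs r idx).Pairwise (fun p q => p.1 < q.1) := by
  induction r with
  | nil => intro idx; simp [APairs]
  | cons c r ih =>
    intro idx
    obtain ⟨hle, hpw⟩ := ih (idx + 1)
    by_cases h1 : c = '('
    · rcases hg : gidAux (cs.drop idx) 0 0 with _ | d
      · rw [show APairs cs (c :: r) idx = APairs cs r (idx + 1) by simp [APairs, h1, hg]]
        exact ⟨fun p hp => by have := hle p hp; omega, hpw⟩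
      · rw [show APairs cs (c :: r) idx = (idx, idx + d) :: APairs cs r (idx + 1) by simp [APairs, h1, hg]]
        constructor
        · intro p hp
          rcases List.mem_cons.mp hp with rfl | hp
          · exact le_refl _
          · have := hle p hp; omega
        · refine List.pairwise_cons.mpr ⟨?_, hpw⟩
          intro p hp
          have := hle p hp
          omega
    · rw [show APairs cs (c :: r) idx = APairs cs r (idx + 1) by simp [APairs, h1]]
      exact ⟨fun p hp => by have := hle p hp; omega, hpw⟩

lemma pairwise_lt_nodup {α : Type} (f : α × α → α × α → Prop) {l : List (α × α)}
    (h : l.Pairwise f) (hirr : ∀ p, ¬ f p p) : l.Nodup :=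
  h.imp (fun {a b} hf heq => by subst heq; exact absurd hf (hirr a))

-- the two programs produce the same set of matched pairs
lemma main_eq (secondary : String) : encode_gap_py secondary = encode_gap_py_alt secondary := by
  unfold encode_gap_py encode_gap_py_alt
  set cs := secondary.toList with hcs
  have hdrop0 : cs.drop 0 = cs := List.drop_zero
  have hempty : ∀ (t : Nat) (h : t < ([] : List Nat).length),
      gidAux (cs.drop ([] : List Nat)[t]) 0 0 = gidAux cs (0 - ([] : List Nat)[t]) ((t : Int) + 1) := by
    intro t ht; simp at ht
  obtain ⟨GTp, GTs⟩ := gid_track cs cs 0 [] hdrop0 (by simp) hempty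
  obtain ⟨P, N, W⟩ := scanP_props cs cs 0 [] hdrop0 (by simp) List.nodup_nil
  have CP := scanP_complete cs cs 0 [] hdrop0
  have MA := mem_APairs cs cs 0 hdrop0
  -- equal membership
  have hmem : ∀ p, p ∈ APairs cs cs 0 ↔ p ∈ scanP cs 0 [] := by
    intro p
    rw [MA p]
    constructor
    · rintro ⟨-, hc, d, hd, he⟩
      rcases CP p.1 (Or.inr ⟨Nat.zero_le _, hc⟩) with h | h
      · obtain ⟨q, hq, hq1⟩ := List.mem_map.mp h
        have hgq := GTp q hq
        rw [← hq1] at hd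
        rw [hd] at hgq
        have hd2 : q.2 - q.1 = d := (Option.some_injective _ hgq).symm
        have hlt := (P q hq).2.1
        have hqp : q = p := by
          have : q.2 = p.2 := by omega
          exact Prod.ext hq1 this
        rw [← hqp]; exact hq
      · rw [GTs p.1 h] at hd; simp at hd
    · intro hp
      obtain ⟨-, hlt, -, hc1, -⟩ := P p hp
      exact ⟨Nat.zero_le _, hc1, p.2 - p.1, GTp p hp, by omega⟩
  -- nodup on both sides
  have ndS : (scanP cs 0 []).Nodup :=
    pairwise_lt_nodup _ W (fun p h => lt_irrefl _ h)
  have ndA : (APairs cs cs 0).Nodup :=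
    pairwise_lt_nodup _ (APairs_fst cs cs 0).2 (fun p h => lt_irrefl _ h)
  have hperm : List.Perm (scanP cs 0 []) (APairs cs cs 0) :=
    (List.perm_ext_iff_of_nodup ndS ndA).mpr (fun p => ((hmem p).symm))
  -- disjoint write positions let the folds commute
  have hsnd : ∀ x ∈ scanP cs 0 [], ∀ y ∈ scanP cs 0 [], x ≠ y → x.2 ≠ y.2 := by
    have W' : (scanP cs 0 []).Pairwise (fun p q => p ≠ q → p.2 ≠ q.2) :=
      W.imp (fun {a b} h => fun _ => by omega)
    intro x hx y hy hxy
    exact List.Pairwise.forall (fun a b h hne he => (h (Ne.symm hne)) (Eq.symm he)) W' hx hy hxy hxy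
  have hfst : ∀ x ∈ scanP cs 0 [], ∀ y ∈ scanP cs 0 [], x.1 = y.1 → x = y :=
    fun x hx y hy h => List.inj_on_of_nodup_map N hx hy h
  have hcross : ∀ x ∈ scanP cs 0 [], ∀ y ∈ scanP cs 0 [], x.1 ≠ y.2 := by
    intro x hx y hy he
    have h1 := (P x hx).2.2.2.1
    have h2 := (P y hy).2.2.2.2
    rw [he, h2] at h1
    simp at h1
  have hcomm : ∀ x ∈ scanP cs 0 [], ∀ y ∈ scanP cs 0 [], ∀ (z : List Int),
      (((z.set x.1 ((x.2 : Int) - (x.1 : Int))).set x.2 ((x.1 : Int) - (x.2 : Int))).set y.1 ((y.2 : Int) - (y.1 : Int))).set y.2 ((y.1 : Int) - (y.2 : Int)) =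
      (((z.set y.1 ((y.2 : Int) - (y.1 : Int))).set y.2 ((y.1 : Int) - (y.2 : Int))).set x.1 ((x.2 : Int) - (x.1 : Int))).set x.2 ((x.1 : Int) - (x.2 : Int)) := by
    intro x hx y hy z
    by_cases hxy : x = y
    · subst hxy; rfl
    · have hx1y1 : x.1 ≠ y.1 := fun h => hxy (hfst x hx y hy h)
      have hx2y2 : x.2 ≠ y.2 := hsnd x hx y hy hxy
      have hx1y2 : x.1 ≠ y.2 := hcross x hx y hy
      have hx2y1 : x.2 ≠ y.1 := fun h => (hcross y hy x hx) h.symm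
      calc (((z.set x.1 _).set x.2 _).set y.1 _).set y.2 _
          = (((z.set x.1 _).set y.1 _).set x.2 _).set y.2 _ := by
            rw [List.set_comm _ _ hx2y1]
        _ = (((z.set y.1 _).set x.1 _).set x.2 _).set y.2 _ := by
            rw [List.set_comm _ _ hx1y1]
        _ = (((z.set y.1 _).set x.1 _).set y.2 _).set x.2 _ := by
            rw [List.set_comm _ _ hx2y2]
        _ = (((z.set y.1 _).set y.2 _).set x.1 _).set x.2 _ := by
            rw [List.set_comm _ _ hx1y2]
  have hfold : ∀ (g : List Int), applyPairs (scanP cs 0 []) g = applyPairs (APairs cs cs 0) g := by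
    intro g
    exact hperm.foldl_eq' (fun x hx y hy z => hcomm x hx y hy z) g
  have hzero : cs.map (fun _ => (0 : Int)) = List.replicate cs.length (0 : Int) := by
    simp [List.map_const']
  rw [A_eq_applyPairs cs cs 0, B_eq_applyPairs cs 0, hzero, hfold]

-- ===== VERDICT (by name: the statement is the Claim_ definition above) =====
theorem encode_gap_py_spec : Claim_equal_encode_gap_py := by
  intro secondary _ _
  exact main_eq secondary
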